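-- pv_equiv track=rewrite | github.com/bitnot/advent-of-code-2023 | day10/part01.py | clarify
-- ===== SOURCE A (Python) =====
-- def clarify(lines):
--     for line in lines:
--         yield line\
--             .replace('F', '╔')\
--             .replace('L', '╚')\
--             .replace('J', '╝')\
--             .replace('7', '╗')\
--             .replace('-', '═')\
--             .replace('|', '║')\
--             .replace('S', '╬')\
--             .replace('.', '·')
-- ===== SOURCE B (Python) =====
-- _TABLE = {'F': '╔', 'L': '╚', 'J': '╝', '7': '╗',
--           '-': '═', '|': '║', 'S': '╬', '.': '·'}
--
-- def clarify(lines):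
--     for line in lines:
--         yield ''.join(_TABLE.get(c, c) for c in line)
-- ===== Notes on version B (the rewrite author's own statement) =====
-- stated objective: idiomatic
-- what changed: replaces the chain of eight successive full-string .replace scans per line by one translation dict built once and a single per-character pass with a table lookup
import Mathlib
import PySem

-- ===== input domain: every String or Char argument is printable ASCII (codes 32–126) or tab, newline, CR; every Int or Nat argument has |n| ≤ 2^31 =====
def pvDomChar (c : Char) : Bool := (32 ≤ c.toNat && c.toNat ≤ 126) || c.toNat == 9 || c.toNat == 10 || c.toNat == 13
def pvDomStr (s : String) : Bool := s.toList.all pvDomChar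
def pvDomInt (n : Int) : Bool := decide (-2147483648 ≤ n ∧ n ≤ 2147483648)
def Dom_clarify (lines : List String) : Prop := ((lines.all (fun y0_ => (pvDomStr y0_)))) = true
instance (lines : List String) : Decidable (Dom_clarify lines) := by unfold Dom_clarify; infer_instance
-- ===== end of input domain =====

-- B builds one translation table and makes a single per-character pass per line,
-- instead of A's chain of eight full-string .replace scans (objective: idiomatic).

-- ===== PORT A =====
def clarify (lines : List String) : List String :=
  lines.map (fun line =>
    PySem.Str.replace (PySem.Str.replace (PySem.Str.replace (PySem.Str.replace
      (PySem.Str.replace (PySem.Str.replace (PySem.Str.replace (PySem.Str.replace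
        line "F" "╔") "L" "╚") "J" "╝") "7" "╗") "-" "═") "|" "║") "S" "╬") "." "·")

-- ===== PORT B =====
def pvTable : PySem.Dict Char Char :=
  ((((((((PySem.Dict.empty.insert 'F' '╔').insert 'L' '╚').insert 'J' '╝').insert
      '7' '╗').insert '-' '═').insert '|' '║').insert 'S' '╬').insert '.' '·')

def clarify_alt (lines : List String) : List String :=
  lines.map (fun line => String.ofList (line.toList.map (fun c => (pvTable.get? c).getD c)))

-- ===== PRECONDITION & SPEC =====
def Spec_clarify (lines : List String) (out : List String) : Prop := out = clarify_alt lines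
instance (lines : List String) (out : List String) : Decidable (Spec_clarify lines out) := by unfold Spec_clarify; infer_instance

-- ===== CLAIM (what is proved, stated in full; the proofs are below) =====
def Claim_equal_clarify : Prop := ∀ (lines : List String), Dom_clarify lines → Spec_clarify lines (clarify lines)

-- ===== LEMMAS AND PROOFS =====

theorem replace_go_single (o n : Char) :
    ∀ (l acc : List Char) (fuel : Nat), l.length ≤ fuel →
      PySem.Chars.replace.go [o] [n] fuel l acc =
        acc.reverse ++ l.map (fun c => if c = o then n else c) := by
  intro l
  induction l with
  | nil =>
    intro acc fuel _
    cases fuel <;> simp [PySem.Chars.replace.go]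
  | cons c t ih =>
    intro acc fuel hle
    cases fuel with
    | zero => simp at hle
    | succ fuel =>
      rw [PySem.Chars.replace.go]
      simp only [List.length_cons] at hle
      by_cases h : o = c
      · subst h
        have hp : [o].isPrefixOf (o :: t) = true := by simp [List.isPrefixOf]
        rw [if_pos hp, show List.drop [o].length (o :: t) = t by simp,
            ih _ fuel (by omega)]
        simp
      · have hp : [o].isPrefixOf (c :: t) = false := by
          simp [List.isPrefixOf]; exact fun hh => h hh
        rw [hp, if_neg (by simp), ih _ fuel (by omega)]
        simp only [List.map_cons, List.reverse_cons, List.append_assoc,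
          List.singleton_append]
        rw [if_neg (Ne.symm h)]

theorem replace_single (s : List Char) (o n : Char) :
    PySem.Chars.replace s [o] [n] = s.map (fun c => if c = o then n else c) := by
  rw [PySem.Chars.replace]
  simp [replace_go_single o n s [] s.length le_rfl]

theorem rep (s : String) (o n : Char) (os ns : String)
    (ho : os.toList = [o]) (hn : ns.toList = [n]) :
    PySem.Str.replace s os ns =
      String.ofList (s.toList.map (fun c => if c = o then n else c)) := by
  unfold PySem.Str.replace
  rw [ho, hn, replace_single]

-- ===== VERDICT (by name: the statement is the Claim_ definition above) =====
theorem clarify_spec : Claim_equal_clarify := by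
  intro lines _
  unfold Spec_clarify clarify clarify_alt
  apply List.map_congr_left
  intro line _
  rw [rep _ '.' '·' _ _ (by decide) (by decide),
      rep _ 'S' '╬' _ _ (by decide) (by decide),
      rep _ '|' '║' _ _ (by decide) (by decide),
      rep _ '-' '═' _ _ (by decide) (by decide),
      rep _ '7' '╗' _ _ (by decide) (by decide),
      rep _ 'J' '╝' _ _ (by decide) (by decide),
      rep _ 'L' '╚' _ _ (by decide) (by decide),
      rep _ 'F' '╔' _ _ (by decide) (by decide)]
  refine congrArg String.ofList ?_
  simp only [String.toList_ofList, List.map_map]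
  apply List.map_congr_left
  intro c _
  simp only [Function.comp_def]
  by_cases hF : c = 'F' <;> by_cases hL : c = 'L' <;> by_cases hJ : c = 'J' <;>
    by_cases h7 : c = '7' <;> by_cases hd : c = '-' <;> by_cases hp : c = '|' <;>
    by_cases hS : c = 'S' <;> by_cases hdot : c = '.' <;>
    simp_all [pvTable, PySem.Dict.get?_insert, PySem.Dict.get?_empty]
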